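-- pv_equiv track=rewrite | github.com/hughjph/AdventOfCode | 2022/Day3/Day3.py | calculate_duplicates
-- ===== SOURCE A (Python) =====
-- def calculate_duplicates(first, second):
--
--     duplicates = []
--
--     for i in range(len(first)):
--         for j in range(len(first[i])):
--             if first[i][j] in second[i]:
--                 duplicates.append(first[i][j])
--                 break
--
--     return duplicates
-- ===== SOURCE B (Python) =====
-- def calculate_duplicates(first, second):
--     duplicates = []
--     for a, b in zip(first, second):
--         common = set(a) & set(b)
--         if common:
--             duplicates.append(min(common, key=a.index))
--     return duplicates
-- ===== Notes on version B (the rewrite author's own statement) =====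
-- stated objective: simpler
-- what changed: Replaces A's index-driven char-by-char scan with break over range(len(first)) by zipping the row pairs, building the set intersection of each pair's characters, and picking the earliest-positioned shared character with min(common, key=first_row.index).
import Mathlib
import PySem

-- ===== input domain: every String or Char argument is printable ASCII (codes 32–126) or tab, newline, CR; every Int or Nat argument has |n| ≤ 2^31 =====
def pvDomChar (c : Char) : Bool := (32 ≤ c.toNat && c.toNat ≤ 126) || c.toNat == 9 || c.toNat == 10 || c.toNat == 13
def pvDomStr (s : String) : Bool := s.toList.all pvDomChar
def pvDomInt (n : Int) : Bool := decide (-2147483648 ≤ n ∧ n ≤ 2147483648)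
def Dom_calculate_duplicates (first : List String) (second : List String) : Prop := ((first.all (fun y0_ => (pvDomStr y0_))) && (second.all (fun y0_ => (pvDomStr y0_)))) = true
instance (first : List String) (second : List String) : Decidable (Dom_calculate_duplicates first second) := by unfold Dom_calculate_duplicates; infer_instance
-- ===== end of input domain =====

-- B replaces A's index-driven scan-with-break by a per-row set intersection and an index-keyed min over zipped rows (objective: simpler).

-- ===== PORT A =====
-- inner 'for j … if first[i][j] in second[i]: append; break' loop: scan the row's chars,
-- return the first one occurring in the second row ('c in s' on a 1-char string = char membership, exact).
def pvFirstHit : List Char → List Char → Option Char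
  | [], _ => none
  | c :: rest, sec => if sec.contains c then some c else pvFirstHit rest sec

def calculate_duplicates (first : List String) (second : List String) : List String :=
  (PySem.List.pyRange 0 (PySem.List.len first)).foldl
    (fun dup i =>
      match pvFirstHit (PySem.List.pyGetD first i "").toList (PySem.List.pyGetD second i "").toList with
      | some c => dup ++ [String.ofList [c]]
      | none => dup)
    []

-- ===== PORT B =====
-- common = set(a) & set(b); if common: min(common, key=a.index)  (key injective on common — every
-- common char has a distinct index in a — so the result is independent of set iteration order).
def pvEarliest (la lb : List Char) : Option Char :=
  PySem.List.min? (PySem.Set.inter (PySem.Set.ofList la) (PySem.Set.ofList lb))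
    (fun c => (PySem.List.index? la c).getD 0)

def calculate_duplicates_alt (first : List String) (second : List String) : List String :=
  (first.zip second).foldl
    (fun dup p =>
      match pvEarliest p.1.toList p.2.toList with
      | some m => dup ++ [String.ofList [m]]
      | none => dup)
    []

-- ===== PRECONDITION & SPEC =====
-- Python A raises IndexError on second[i] when i ≥ len(second) and first[i] is non-empty;
-- Pre_ excludes exactly those inputs (rows of first beyond len(second) must be empty).
def Pre_calculate_duplicates (first : List String) (second : List String) : Prop :=
  ∀ s ∈ first.drop second.length, s.toList = []
instance (first : List String) (second : List String) : Decidable (Pre_calculate_duplicates first second) := by unfold Pre_calculate_duplicates; infer_instance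

def pvWitness_calculate_duplicates : List String × List String := (["ab", "cd"], ["bc", "xc"])

def Spec_calculate_duplicates (first : List String) (second : List String) (out : List String) : Prop := out = calculate_duplicates_alt first second
instance (first : List String) (second : List String) (out : List String) : Decidable (Spec_calculate_duplicates first second out) := by unfold Spec_calculate_duplicates; infer_instance

-- ===== CLAIM (what is proved, stated in full; the proofs are below) =====
def Claim_equal_calculate_duplicates : Prop := ∀ (first : List String) (second : List String), Dom_calculate_duplicates first second → Pre_calculate_duplicates first second → Spec_calculate_duplicates first second (calculate_duplicates first second)


-- ===== LEMMAS AND PROOFS =====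

-- the value a row contributes to the output (the common reference both ports reduce to)
def pvRow (f s : String) : List String :=
  match List.find? (fun c => s.toList.contains c) f.toList with
  | some c => [String.ofList [c]]
  | none => []

theorem pvFirstHit_eq_find? (la lb : List Char) :
    pvFirstHit la lb = List.find? (fun c => lb.contains c) la := by
  induction la with
  | nil => rfl
  | cons c rest ih => simp only [pvFirstHit, List.find?_cons]; split_ifs with h <;> simp_all

theorem pvRow_second_empty (f : String) : pvRow f "" = [] := by
  unfold pvRow
  have h : List.find? (fun c => (("" : String).toList.contains c)) f.toList = none := by
    rw [List.find?_eq_none]; intro x _; simp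
  rw [h]

theorem pvEarliest_eq_find? (la lb : List Char) :
    pvEarliest la lb = List.find? (fun c => lb.contains c) la := by
  unfold pvEarliest
  cases h : List.find? (fun c => lb.contains c) la with
  | none =>
    rw [List.find?_eq_none] at h
    have hnil : PySem.Set.inter (PySem.Set.ofList la) (PySem.Set.ofList lb) = [] := by
      rw [List.eq_nil_iff_forall_not_mem]
      intro y hy
      rw [PySem.Set.mem_inter, PySem.Set.mem_ofList, PySem.Set.mem_ofList] at hy
      exact h y hy.1 (by simpa using hy.2)
    rw [hnil, PySem.List.min?_eq_none_iff]
  | some c =>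
    rw [List.find?_eq_some_iff_append] at h
    obtain ⟨hc, as, bs, hla, has⟩ := h
    have hcas : c ∉ as := fun hm => by have h1 := has c hm; rw [hc] at h1; simp at h1
    have hcla : c ∈ la := by rw [hla]; exact List.mem_append_right _ (List.mem_cons_self ..)
    have hcS : c ∈ PySem.Set.inter (PySem.Set.ofList la) (PySem.Set.ofList lb) := by
      rw [PySem.Set.mem_inter, PySem.Set.mem_ofList, PySem.Set.mem_ofList]
      exact ⟨hcla, by simpa using hc⟩
    -- key of c is as.length
    have hkc : PySem.List.index? la c = some as.length := by
      rw [PySem.List.index?_eq_some_iff]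
      exact ⟨as, bs, hla, rfl, hcas⟩
    cases hm : PySem.List.min? (PySem.Set.inter (PySem.Set.ofList la) (PySem.Set.ofList lb))
        (fun c => (PySem.List.index? la c).getD 0) with
    | none =>
      rw [PySem.List.min?_eq_none_iff] at hm
      rw [hm] at hcS; cases hcS
    | some m =>
      have hmS := PySem.List.min?_mem hm
      have hmin := PySem.List.min?_isMin hm
      have hmla : m ∈ la := by
        rw [PySem.Set.mem_inter, PySem.Set.mem_ofList] at hmS; exact hmS.1
      have hmlb : m ∈ lb := by
        rw [PySem.Set.mem_inter, PySem.Set.mem_ofList, PySem.Set.mem_ofList] at hmS; exact hmS.2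
      obtain ⟨k, hk⟩ := Option.isSome_iff_exists.mp ((PySem.List.index?_isSome_iff la m).mpr hmla)
      obtain ⟨hklt, hgm, hfst⟩ := PySem.List.getElem_of_index?_eq_some hk
      -- key m ≤ key c, i.e. k ≤ as.length
      have hle : k ≤ as.length := by
        have h2 := hmin c hcS
        rw [hk, hkc] at h2
        simpa using h2
      -- k < as.length is impossible: la[k] = m would lie in as, but m ∈ lb contradicts has
      have hknot : ¬ k < as.length := by
        intro hlt
        have hget : la[k] = as[k]'hlt := by
          subst hla; exact List.getElem_append_left hlt
        have : m ∈ as := by rw [← hgm, hget]; exact List.getElem_mem _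
        have := has m this
        simp [hmlb] at this
      have hkeq : k = as.length := Nat.le_antisymm hle (Nat.le_of_not_lt hknot)
      subst hkeq
      -- so la[as.length] = c, hence m = c
      have : m = c := by
        rw [← hgm]; subst hla
        simp [List.getElem_append_right]
      rw [this]

theorem pvRow_eq_A (f s : String) :
    (match pvFirstHit f.toList s.toList with
     | some c => [String.ofList [c]] | none => []) = pvRow f s := by
  rw [pvRow, pvFirstHit_eq_find?]

-- A as a flatMap of pvRow over the index range
theorem calculate_duplicates_eq_flatMap (first second : List String) :
    calculate_duplicates first second =
      (List.range first.length).flatMap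
        (fun k => pvRow (first.getD k "") (second.getD k "")) := by
  unfold calculate_duplicates
  rw [PySem.List.pyRange_one]
  have hlen : ((PySem.List.len first - 0).toNat) = first.length := by
    simp [PySem.List.len]
  rw [hlen, List.foldl_map]
  have hfun : (fun (dup : List String) (k : Nat) =>
      match pvFirstHit (PySem.List.pyGetD first (0 + (k : Int)) "").toList
              (PySem.List.pyGetD second (0 + (k : Int)) "").toList with
      | some c => dup ++ [String.ofList [c]]
      | none => dup)
    = fun dup k => dup ++ pvRow (first.getD k "") (second.getD k "") := by
    funext dup k
    rw [show (0 + (k : Int)) = (k : Int) by ring, PySem.List.pyGetD_natCast,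
        PySem.List.pyGetD_natCast, ← pvRow_eq_A]
    cases pvFirstHit (first.getD k "").toList (second.getD k "").toList <;> simp
  rw [hfun, PySem.List.foldl_append_eq_flatMap]
  rfl

-- B as a flatMap of pvRow over the zipped rows
theorem calculate_duplicates_alt_eq_flatMap (first second : List String) :
    calculate_duplicates_alt first second =
      (first.zip second).flatMap (fun p => pvRow p.1 p.2) := by
  unfold calculate_duplicates_alt
  have hfun : (fun (dup : List String) (p : String × String) =>
      match pvEarliest p.1.toList p.2.toList with
      | some m => dup ++ [String.ofList [m]]
      | none => dup)
    = fun dup p => dup ++ pvRow p.1 p.2 := by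
    funext dup p
    rw [pvEarliest_eq_find?, pvRow]
    cases List.find? (fun c => p.2.toList.contains c) p.1.toList <;> simp
  rw [hfun, PySem.List.foldl_append_eq_flatMap]
  rfl

-- index-range traversal of A = zip traversal of B (rows past second contribute nothing:
-- pvRow _ "" = [], and the port reads "" there via pyGetD's default)
theorem pvBridge : ∀ (first second : List String),
    (List.range first.length).flatMap
        (fun k => pvRow (first.getD k "") (second.getD k ""))
      = (first.zip second).flatMap (fun p => pvRow p.1 p.2) := by
  intro first
  induction first with
  | nil => intro second; simp
  | cons f fs ih =>
    intro second
    cases second with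
    | nil =>
      simp only [List.zip_nil_right, List.flatMap_nil]
      rw [List.flatMap_eq_nil_iff]
      intro k _
      have h0 : (List.getD ([] : List String) k "") = "" := rfl
      rw [h0, pvRow_second_empty]
    | cons s ss =>
      rw [List.length_cons, List.range_succ_eq_map, List.flatMap_cons, List.flatMap_map]
      simp only [List.getD_cons_zero, List.getD_cons_succ, Nat.succ_eq_add_one]
      rw [List.zip_cons_cons, List.flatMap_cons]
      congr 1
      exact ih ss

-- ===== VERDICT (by name: the statement is the Claim_ definition above) =====
theorem calculate_duplicates_spec : Claim_equal_calculate_duplicates := by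
  intro first second _ _
  unfold Spec_calculate_duplicates
  rw [calculate_duplicates_eq_flatMap, calculate_duplicates_alt_eq_flatMap, pvBridge]
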